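-- pv_equiv track=rewrite | github.com/MrBrantCode/unitest_baseline | mut_generate/mist_train_cf/cf_55725/solution.py | detectDupes
-- ===== SOURCE A (Python) =====
-- def detectDupes(input_tuple):
--     seen = set()
--     duplicates = set()
--     for item in input_tuple:
--         if item in seen:
--             duplicates.add(item)
--         seen.add(item)
--     return len(duplicates) > 0, duplicates
-- ===== SOURCE B (Python) =====
-- def detectDupes(input_tuple):
--     # stateless one-pass comprehension: an element is a duplicate exactly at
--     # the position of its second occurrence, i.e. where the prefix holds it once
--     duplicates = {x for i, x in enumerate(input_tuple) if input_tuple[:i].count(x) == 1}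
--     return len(duplicates) > 0, duplicates
-- ===== Notes on version B (the rewrite author's own statement) =====
-- stated objective: simpler
-- what changed: A's incremental two-set pass (seen + duplicates mutated in a loop) is replaced by a single stateless set comprehension that marks x a duplicate exactly when the prefix before it contains x once (prefix counting instead of a seen-set).
import Mathlib
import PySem

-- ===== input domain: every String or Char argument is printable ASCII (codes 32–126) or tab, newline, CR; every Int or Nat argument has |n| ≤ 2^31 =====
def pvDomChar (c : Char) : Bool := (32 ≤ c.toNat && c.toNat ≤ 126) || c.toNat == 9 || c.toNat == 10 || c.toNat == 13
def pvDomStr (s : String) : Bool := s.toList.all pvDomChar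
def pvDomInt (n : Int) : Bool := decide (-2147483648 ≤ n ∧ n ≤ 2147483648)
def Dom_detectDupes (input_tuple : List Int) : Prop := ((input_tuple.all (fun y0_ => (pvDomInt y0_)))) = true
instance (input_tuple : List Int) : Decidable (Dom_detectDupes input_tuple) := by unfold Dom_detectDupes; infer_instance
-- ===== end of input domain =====

-- B replaces A's incremental seen/duplicates loop by a stateless prefix-count comprehension (simpler decomposition, not faster).


-- ===== PORT A =====
-- seen/duplicates loop: for item: if item in seen: duplicates.add(item); seen.add(item)
def detectDupes (input_tuple : List Int) : Bool × List Int :=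
  let st := input_tuple.foldl
    (fun (st : PySem.Set Int × PySem.Set Int) item =>
      (PySem.Set.add st.1 item,
       if PySem.Set.contains st.1 item then PySem.Set.add st.2 item else st.2))
    (PySem.Set.empty, PySem.Set.empty)
  (decide (0 < PySem.Set.len st.2), st.2)

-- ===== PORT B =====
-- {x for i, x in enumerate(t) if t[:i].count(x) == 1}
def detectDupes_alt (input_tuple : List Int) : Bool × List Int :=
  let duplicates : PySem.Set Int :=
    (PySem.List.enumerate input_tuple 0).foldl
      (fun (s : PySem.Set Int) p =>
        if PySem.List.count (PySem.List.slice input_tuple (some 0) (some p.1)) p.2 == 1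
        then PySem.Set.add s p.2 else s)
      PySem.Set.empty
  (decide (0 < PySem.Set.len duplicates), duplicates)

-- ===== PRECONDITION & SPEC =====
def Spec_detectDupes (input_tuple : List Int) (out : Bool × List Int) : Prop := out = detectDupes_alt input_tuple
instance (input_tuple : List Int) (out : Bool × List Int) : Decidable (Spec_detectDupes input_tuple out) := by unfold Spec_detectDupes; infer_instance

-- ===== CLAIM (what is proved, stated in full; the proofs are below) =====
def Claim_equal_detectDupes : Prop := ∀ (input_tuple : List Int), Dom_detectDupes input_tuple → Spec_detectDupes input_tuple (detectDupes input_tuple)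

-- ===== LEMMAS AND PROOFS =====

-- reference accumulator: process rest after prefix q, adding x when q.count x == 1
def pvBacc : List Int → PySem.Set Int → List Int → PySem.Set Int
  | _, s, [] => s
  | q, s, x :: rest => pvBacc (q ++ [x]) (if q.count x == 1 then PySem.Set.add s x else s) rest

theorem pvA_loop (rest : List Int) : ∀ (q : List Int) (s : PySem.Set Int),
    (∀ y, y ∈ s ↔ 2 ≤ q.count y) →
    (rest.foldl
      (fun (st : PySem.Set Int × PySem.Set Int) item =>
        (PySem.Set.add st.1 item,
         if PySem.Set.contains st.1 item then PySem.Set.add st.2 item else st.2))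
      (PySem.Set.ofList q, s)).2 = pvBacc q s rest := by
  induction rest with
  | nil => intro q s _; simp [pvBacc]
  | cons x rest ih =>
    intro q s hinv
    have hseen : PySem.Set.add (PySem.Set.ofList q) x = PySem.Set.ofList (q ++ [x]) :=
      (PySem.Set.ofList_append_singleton q x).symm
    have hcon : (PySem.Set.contains (PySem.Set.ofList q) x = true) ↔ x ∈ q := by
      rw [PySem.Set.contains_iff, PySem.Set.mem_ofList]
    have hcount : ∀ y : Int, (q ++ [x]).count y = q.count y + (if y = x then 1 else 0) := by
      intro y
      by_cases h : y = x
      · subst h; simp [List.count_append]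
      · simp [List.count_append, h, Ne.symm h]
    have hdup : (if PySem.Set.contains (PySem.Set.ofList q) x then PySem.Set.add s x else s)
        = (if q.count x == 1 then PySem.Set.add s x else s) := by
      rcases Nat.lt_trichotomy (q.count x) 1 with h0 | h1 | h2
      · have hx : x ∉ q := by
          intro hm; have := List.count_pos_iff.2 hm; omega
        have hcf : PySem.Set.contains (PySem.Set.ofList q) x = false := by
          rw [Bool.eq_false_iff]; intro hc; exact hx (hcon.1 hc)
        rw [hcf, if_neg (by simp),
          if_neg (by simpa using (show q.count x ≠ 1 by omega))]
      · have hx : x ∈ q := List.count_pos_iff.1 (by omega)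
        rw [if_pos (hcon.2 hx), if_pos (by simpa using h1)]
      · have hx : x ∈ q := List.count_pos_iff.1 (by omega)
        have hxs : x ∈ s := (hinv x).2 (by omega)
        rw [if_pos (hcon.2 hx),
          if_neg (by simpa using (show q.count x ≠ 1 by omega)),
          PySem.Set.add_of_mem hxs]
    simp only [List.foldl_cons]
    rw [hseen, hdup, pvBacc]
    by_cases hc : (q.count x == 1) = true
    · have hc1 : q.count x = 1 := by simpa using hc
      rw [if_pos hc]
      refine ih (q ++ [x]) _ ?_
      intro y
      rw [PySem.Set.mem_add, hinv y, hcount y]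
      by_cases h : y = x
      · subst h; rw [if_pos rfl]; constructor
        · intro _; omega
        · intro _; right; rfl
      · rw [if_neg h]
        constructor
        · rintro (hy | hy)
          · omega
          · exact absurd hy h
        · intro hy; left; omega
    · have hc1 : q.count x ≠ 1 := by simpa using hc
      rw [if_neg hc]
      refine ih (q ++ [x]) _ ?_
      intro y
      rw [hinv y, hcount y]
      by_cases h : y = x
      · subst h; rw [if_pos rfl]; omega
      · rw [if_neg h]; omega

theorem pvB_loop (t : List Int) : ∀ (rest : List Int) (n : Nat) (s : PySem.Set Int),
    t.drop n = rest →
    ((PySem.List.enumerate rest (n : Int)).foldl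
      (fun (s : PySem.Set Int) p =>
        if PySem.List.count (PySem.List.slice t (some 0) (some p.1)) p.2 == 1
        then PySem.Set.add s p.2 else s) s) = pvBacc (t.take n) s rest := by
  intro rest
  induction rest with
  | nil => intro n s _; simp [PySem.List.enumerate_nil, pvBacc]
  | cons x rest ih =>
    intro n s hdrop
    have hx : t[n]? = some x := by
      have h0 : (t.drop n)[0]? = t[n]? := by simp
      rw [hdrop] at h0; simpa using h0.symm
    have htake : t.take (n + 1) = t.take n ++ [x] := by
      rw [List.take_add_one, hx]; rfl
    have hslice : PySem.List.slice t (some 0) (some (n : Int)) = t.take n := by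
      rw [PySem.List.slice_zero_start, PySem.List.slice_to_natCast]
    have hdrop' : t.drop (n + 1) = rest := by
      have h1 : t.drop (n + 1) = (t.drop n).drop 1 := by
        rw [List.drop_drop, Nat.add_comm]
      rw [h1, hdrop]; rfl
    rw [PySem.List.enumerate_cons, List.foldl_cons, hslice, pvBacc]
    have hcast : (n : Int) + 1 = ((n + 1 : Nat) : Int) := by push_cast; ring
    rw [hcast, ih (n + 1) _ hdrop', htake]
    rfl

theorem pvDup_eq (t : List Int) :
    (t.foldl
      (fun (st : PySem.Set Int × PySem.Set Int) item =>
        (PySem.Set.add st.1 item,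
         if PySem.Set.contains st.1 item then PySem.Set.add st.2 item else st.2))
      (PySem.Set.empty, PySem.Set.empty)).2
    = ((PySem.List.enumerate t 0).foldl
      (fun (s : PySem.Set Int) p =>
        if PySem.List.count (PySem.List.slice t (some 0) (some p.1)) p.2 == 1
        then PySem.Set.add s p.2 else s) PySem.Set.empty) := by
  have hA := pvA_loop t [] PySem.Set.empty (by intro y; simp [PySem.Set.empty])
  have hB := pvB_loop t t 0 PySem.Set.empty (by simp)
  exact hA.trans hB.symm

-- ===== VERDICT (by name: the statement is the Claim_ definition above) =====
theorem detectDupes_spec : Claim_equal_detectDupes := by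
  intro t _
  unfold Spec_detectDupes
  dsimp only [detectDupes, detectDupes_alt]
  rw [pvDup_eq t]
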